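-- pv_equiv track=rewrite | github.com/sportiz91/react-component-engineer | src/libs/utils/code_analysis.py | remove_blank_lines_from_code_lines
-- ===== SOURCE A (Python) =====
-- from typing import Optional, List, Set, Dict, Tuple
--
-- def remove_blank_lines_from_code_lines(lines: List[str]) -> str:
--     formatted_lines = []
--     blank_line_count = 0
--
--     for line in lines:
--         if line.strip():
--             if blank_line_count > 0:
--                 formatted_lines.extend([""] * min(blank_line_count, 2))
--             formatted_lines.append(line)
--             blank_line_count = 0
--         else:
--             blank_line_count += 1
--
--     while formatted_lines and not formatted_lines[-1].strip():
--         formatted_lines.pop()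
--
--     return "\n".join(formatted_lines)
-- ===== SOURCE B (Python) =====
-- def remove_blank_lines_from_code_lines(lines):
--     # split the input into maximal runs of blank / non-blank lines
--     groups = []
--     i, n = 0, len(lines)
--     while i < n:
--         key = bool(lines[i].strip())
--         j = i + 1
--         while j < n and bool(lines[j].strip()) == key:
--             j += 1
--         groups.append((key, lines[i:j]))
--         i = j
--     # a trailing blank run is dropped entirely
--     if groups and not groups[-1][0]:
--         groups.pop()
--     # non-blank runs verbatim, blank runs collapsed to at most two empty lines
--     parts = []
--     for key, run in groups:
--         parts.extend(run if key else [""] * min(len(run), 2))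
--     return "\n".join(parts)
-- ===== Notes on version B (the rewrite author's own statement) =====
-- stated objective: alternative
-- what changed: B splits the input into maximal runs of blank/non-blank lines (group-then-render), drops a trailing blank run and caps blank runs at two, instead of A's single pass with a blank-line counter plus a trailing pop loop.
import Mathlib
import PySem

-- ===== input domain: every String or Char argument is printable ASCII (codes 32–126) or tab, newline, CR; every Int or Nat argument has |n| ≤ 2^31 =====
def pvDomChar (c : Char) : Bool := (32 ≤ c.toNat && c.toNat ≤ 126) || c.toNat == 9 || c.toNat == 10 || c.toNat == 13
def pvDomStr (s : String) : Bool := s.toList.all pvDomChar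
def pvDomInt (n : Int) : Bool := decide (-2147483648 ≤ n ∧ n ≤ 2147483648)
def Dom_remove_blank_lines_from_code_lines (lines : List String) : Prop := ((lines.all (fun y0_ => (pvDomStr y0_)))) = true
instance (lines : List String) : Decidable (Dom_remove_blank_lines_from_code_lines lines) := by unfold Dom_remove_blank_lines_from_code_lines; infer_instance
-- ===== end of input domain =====

-- B replaces A's blank-line counter + trailing pop loop by splitting the input into maximal
-- blank/non-blank runs, dropping a trailing blank run and rendering each run (objective: alternative).

-- `bool(line.strip())` — true iff the line has a non-whitespace character
def pvNB (l : String) : Bool := PySem.Str.strip l != ""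

-- ===== PORT A =====
-- the `while formatted_lines and not formatted_lines[-1].strip(): pop()` loop,
-- ported over the reversed list (popping from the back = dropping from the front of the reverse)
def pvPopTRev : List String → List String
  | [] => []
  | x :: rest => if pvNB x then x :: rest else pvPopTRev rest

def remove_blank_lines_from_code_lines (lines : List String) : String :=
  let st := lines.foldl (fun (st : List String × Nat) line =>
    if pvNB line then
      ((if st.2 > 0 then st.1 ++ List.replicate (min st.2 2) "" else st.1) ++ [line], 0)
    else (st.1, st.2 + 1)) ([], 0)
  let formatted := (pvPopTRev st.1.reverse).reverse
  PySem.Str.join "\n" formatted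

-- ===== PORT B =====
-- maximal runs of lines with the same blank/non-blank key (Source B's outer while loop;
-- the inner `while j < n and …` scan is the takeWhile/dropWhile split)
def pvGroupRuns : List String → List (Bool × List String)
  | [] => []
  | l :: rest =>
    (pvNB l, l :: rest.takeWhile (fun x => pvNB x == pvNB l)) ::
      pvGroupRuns (rest.dropWhile (fun x => pvNB x == pvNB l))
termination_by ls => ls.length
decreasing_by
  simp only [List.length_cons]
  exact Nat.lt_succ_of_le (List.length_dropWhile_le _ _)

-- `if groups and not groups[-1][0]: groups.pop()`
def pvDlb (gs : List (Bool × List String)) : List (Bool × List String) :=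
  match gs.getLast? with
  | some (false, _) => gs.dropLast
  | _ => gs

def remove_blank_lines_from_code_lines_alt (lines : List String) : String :=
  let gs := pvDlb (pvGroupRuns lines)
  let parts := gs.foldl (fun acc g =>
    acc ++ (if g.1 then g.2 else List.replicate (min g.2.length 2) "")) ([] : List String)
  PySem.Str.join "\n" parts

-- ===== PRECONDITION & SPEC =====
def Spec_remove_blank_lines_from_code_lines (lines : List String) (out : String) : Prop := out = remove_blank_lines_from_code_lines_alt lines
instance (lines : List String) (out : String) : Decidable (Spec_remove_blank_lines_from_code_lines lines out) := by unfold Spec_remove_blank_lines_from_code_lines; infer_instance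

-- ===== CLAIM (what is proved, stated in full; the proofs are below) =====
def Claim_equal_remove_blank_lines_from_code_lines : Prop := ∀ (lines : List String), Dom_remove_blank_lines_from_code_lines lines → Spec_remove_blank_lines_from_code_lines lines (remove_blank_lines_from_code_lines lines)

-- ===== LEMMAS AND PROOFS =====

-- canonical list of kept lines: blank count c pending, cap at 2 before each non-blank line
def pvF : Nat → List String → List String
  | _, [] => []
  | c, l :: rest => if pvNB l then List.replicate (min c 2) "" ++ l :: pvF 0 rest else pvF (c + 1) rest

theorem pvFoldA (rest : List String) : ∀ (acc : List String) (c : Nat),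
    (rest.foldl (fun (st : List String × Nat) line =>
      if pvNB line then
        ((if st.2 > 0 then st.1 ++ List.replicate (min st.2 2) "" else st.1) ++ [line], 0)
      else (st.1, st.2 + 1)) (acc, c)).1 = acc ++ pvF c rest := by
  induction rest with
  | nil => intro acc c; simp [pvF]
  | cons l rest ih =>
    intro acc c
    by_cases h : pvNB l = true
    · simp only [List.foldl_cons, h, if_true, pvF]
      rw [ih]
      by_cases hc : c > 0
      · simp [hc]
      · have : c = 0 := by omega
        subst this
        simp
    · simp only [List.foldl_cons, h, pvF, Bool.false_eq_true, if_false]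
      exact ih acc (c + 1)

-- pvF is empty or ends with a non-blank line, so the trailing pop loop does nothing
theorem pvF_last (ls : List String) : ∀ c, pvF c ls = [] ∨
    ∃ x xs, pvF c ls = xs ++ [x] ∧ pvNB x = true := by
  induction ls with
  | nil => intro c; left; rfl
  | cons l rest ih =>
    intro c
    by_cases h : pvNB l = true
    · right
      rcases ih 0 with h0 | ⟨x, xs, hx, hnb⟩
      · exact ⟨l, List.replicate (min c 2) "", by simp [pvF, h, h0]⟩
      · exact ⟨x, List.replicate (min c 2) "" ++ l :: xs, by simp [pvF, h, hx, hnb]⟩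
    · simpa [pvF, h] using ih (c + 1)

theorem pvPop_pvF (c : Nat) (ls : List String) :
    (pvPopTRev (pvF c ls).reverse).reverse = pvF c ls := by
  rcases pvF_last ls c with h | ⟨x, xs, hx, hnb⟩
  · simp [h, pvPopTRev]
  · rw [hx]
    simp [pvPopTRev, hnb]

theorem pvF_nonblank_run (run : List String) (rest : List String)
    (h : ∀ x ∈ run, pvNB x = true) : pvF 0 (run ++ rest) = run ++ pvF 0 rest := by
  induction run with
  | nil => simp
  | cons a t ih =>
    have ha : pvNB a = true := h a (by simp)
    simp only [List.cons_append, pvF, ha, if_true]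
    rw [ih (fun x hx => h x (by simp [hx]))]
    simp

theorem pvF_blank_run (run : List String) : ∀ (c : Nat) (rest : List String),
    (∀ x ∈ run, pvNB x = false) → pvF c (run ++ rest) = pvF (c + run.length) rest := by
  induction run with
  | nil => intro c rest _; simp
  | cons a t ih =>
    intro c rest h
    have ha : pvNB a = false := h a (by simp)
    simp only [List.cons_append, pvF, ha, Bool.false_eq_true, if_false]
    rw [ih (c + 1) rest (fun x hx => h x (by simp [hx]))]
    congr 1
    simp [List.length_cons]
    omega

-- render a group
def pvRenderG (g : Bool × List String) : List String :=
  if g.1 then g.2 else List.replicate (min g.2.length 2) ""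

theorem pvFoldRender (gs : List (Bool × List String)) : ∀ acc : List String,
    gs.foldl (fun acc g =>
      acc ++ (if g.1 then g.2 else List.replicate (min g.2.length 2) "")) acc
      = acc ++ gs.flatMap pvRenderG := by
  induction gs with
  | nil => intro acc; simp
  | cons g t ih =>
    intro acc
    simp only [List.foldl_cons, List.flatMap_cons, ih, pvRenderG]
    simp

theorem pvDlb_cons (g : Bool × List String) (gs : List (Bool × List String)) (h : gs ≠ []) :
    pvDlb (g :: gs) = g :: pvDlb gs := by
  obtain ⟨a, t, rfl⟩ := List.exists_cons_of_ne_nil h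
  unfold pvDlb
  rw [List.getLast?_cons_cons, List.dropLast_cons_of_ne_nil (by simp)]
  rcases hl : (a :: t).getLast? with _ | ⟨b, r⟩
  · simp at hl
  · cases b <;> simp

theorem pvGroupRuns_ne_nil (l : String) (rest : List String) :
    pvGroupRuns (l :: rest) ≠ [] := by
  rw [pvGroupRuns]
  simp

theorem pvDropWhile_head_not {α : Type} (p : α → Bool) (l : List α) :
    ∀ y t, l.dropWhile p = y :: t → p y = false := by
  induction l with
  | nil => intro y t h; simp at h
  | cons a l ih =>
    intro y t h
    by_cases ha : p a = true
    · rw [List.dropWhile_cons_of_pos ha] at h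
      exact ih y t h
    · rw [List.dropWhile_cons_of_neg ha] at h
      cases h
      simpa using ha

-- the main correspondence: rendering the (trailing-blank-dropped) runs is pvF 0
set_option maxHeartbeats 1000000 in
theorem pvMain (n : Nat) : ∀ (ls : List String), ls.length ≤ n →
    (pvDlb (pvGroupRuns ls)).flatMap pvRenderG = pvF 0 ls := by
  induction n with
  | zero =>
    intro ls h
    have : ls = [] := by cases ls <;> simp_all
    subst this
    rw [pvGroupRuns]
    simp [pvDlb, pvF]
  | succ n ih =>
    intro ls h
    cases ls with
    | nil =>
      rw [pvGroupRuns]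
      simp [pvDlb, pvF]
    | cons l rest =>
      rw [pvGroupRuns]
      generalize hT : rest.takeWhile (fun x => pvNB x == pvNB l) = run
      generalize hD : rest.dropWhile (fun x => pvNB x == pvNB l) = rest'
      have hsplit : run ++ rest' = rest := by
        rw [← hT, ← hD]; exact List.takeWhile_append_dropWhile
      have hrunall : ∀ x ∈ run, pvNB x = pvNB l := by
        rw [← hT]; intro x hx; simpa using List.mem_takeWhile_imp hx
      have hhead : ∀ y t, rest' = y :: t → (pvNB y == pvNB l) = false := by
        intro y t hyt
        exact pvDropWhile_head_not (fun x => pvNB x == pvNB l) rest y t (by rw [hD, hyt])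
      have ihr : (pvDlb (pvGroupRuns rest')).flatMap pvRenderG = pvF 0 rest' := by
        refine ih rest' ?_
        rw [← hD]
        have := List.length_dropWhile_le (fun x => pvNB x == pvNB l) rest
        simp only [List.length_cons] at h
        omega
      conv_rhs => rw [← hsplit]
      rw [show (l :: (run ++ rest')) = (l :: run) ++ rest' from rfl]
      by_cases hk : pvNB l = true
      · -- non-blank run: emitted verbatim
        have hrun' : ∀ x ∈ l :: run, pvNB x = true := by
          intro x hx
          rcases List.mem_cons.mp hx with rfl | hx
          · exact hk
          · rw [hrunall x hx, hk]
        rw [hk, pvF_nonblank_run (l :: run) rest' hrun']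
        cases rest' with
        | nil =>
          rw [pvGroupRuns]
          simp [pvDlb, pvRenderG, pvF]
        | cons y t =>
          rw [pvDlb_cons _ _ (pvGroupRuns_ne_nil y t), List.flatMap_cons, ihr]
          simp [pvRenderG]
      · -- blank run: rendered as min(len, 2) empties, dropped if trailing
        have hkf : pvNB l = false := by simpa using hk
        have hblank : ∀ x ∈ l :: run, pvNB x = false := by
          intro x hx
          rcases List.mem_cons.mp hx with rfl | hx
          · exact hkf
          · rw [hrunall x hx, hkf]
        rw [hkf, pvF_blank_run (l :: run) 0 rest' hblank]
        cases rest' with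
        | nil =>
          rw [pvGroupRuns]
          simp [pvDlb, pvF]
        | cons y t =>
          have hy : pvNB y = true := by
            have := hhead y t rfl
            rw [hkf] at this
            simpa using this
          rw [pvDlb_cons _ _ (pvGroupRuns_ne_nil y t), List.flatMap_cons, ihr]
          have h2 : pvF 0 (y :: t) = y :: pvF 0 t := by simp [pvF, hy]
          have h1 : pvF (0 + (l :: run).length) (y :: t)
              = List.replicate (min (run.length + 1) 2) "" ++ (y :: pvF 0 t) := by
            simp [pvF, hy]
          rw [h2, h1]
          simp [pvRenderG]

-- ===== VERDICT (by name: the statement is the Claim_ definition above) =====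
theorem remove_blank_lines_from_code_lines_spec : Claim_equal_remove_blank_lines_from_code_lines := by
  intro lines _
  unfold Spec_remove_blank_lines_from_code_lines
  unfold remove_blank_lines_from_code_lines remove_blank_lines_from_code_lines_alt
  simp only
  rw [pvFoldA, pvFoldRender]
  simp only [List.nil_append]
  rw [pvPop_pvF, pvMain lines.length lines (le_refl _)]
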